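-- pv_equiv track=rewrite | github.com/smrsassa/Studying-Python | RSA/func.py | encriptKey
-- ===== SOURCE A (Python) =====
-- def remove_repetidos( lista ):
--     l = []
--     for i in lista:
--         if i not in l:
--             l.append(i)
--     l.sort()
--     return l
--
-- def encriptKey( num, tetaN ):
--
--   lista = []
--   for i in range(2, num):
--     status = 0
--     for c in range(2 , i+1):
--       if ( i % c ) == 0:
--         if ( num % c ) == 0:
--           status = 1
--     if status == 0:
--       lista.append(i)
--
--   lista = remove_repetidos(lista)
--
--   for i in range(2, tetaN):
--     status = 0
--     for c in range(2 , i+1):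
--       if ( i % c ) == 0:
--         if ( tetaN % c ) == 0:
--           status = 1
--     if status == 0:
--       return i
-- ===== SOURCE B (Python) =====
-- def encriptKey(num, tetaN):
--     # return value only; A's first loop over num is dead computation and is dropped
--     def gcd(a, b):
--         a, b = abs(a), abs(b)
--         while b:
--             a, b = b, a % b
--         return a
--     for i in range(2, tetaN):
--         if gcd(i, tetaN) == 1:
--             return i
-- ===== Notes on version B (the rewrite author's own statement) =====
-- stated objective: faster
-- what changed: B drops A's dead quadratic loop over num and tests each candidate with Euclid's gcd instead of A's per-candidate trial division over all c in [2, i+1).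
import Mathlib
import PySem

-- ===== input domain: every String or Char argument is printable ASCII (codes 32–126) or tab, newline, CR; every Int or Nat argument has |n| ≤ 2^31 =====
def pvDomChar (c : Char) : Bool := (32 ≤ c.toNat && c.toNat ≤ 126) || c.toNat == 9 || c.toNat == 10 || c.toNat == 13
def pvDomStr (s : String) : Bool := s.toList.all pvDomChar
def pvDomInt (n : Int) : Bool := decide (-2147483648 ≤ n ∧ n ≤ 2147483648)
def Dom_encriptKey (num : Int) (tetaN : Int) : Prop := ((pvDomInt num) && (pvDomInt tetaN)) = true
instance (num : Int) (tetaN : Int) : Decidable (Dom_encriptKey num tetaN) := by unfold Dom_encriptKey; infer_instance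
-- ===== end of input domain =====

-- B drops A's dead quadratic loop over num and tests candidates with Euclid's gcd instead of
-- per-candidate trial division; equivalence is about the RETURN value (A mutates nothing).

-- ===== PORT A =====
-- inner 'for c in range(2, i+1)' loop computing status for candidate i against m
def pvStatusA (i m : Int) : Int :=
  (PySem.List.pyRange 2 (i+1) 1).foldl
    (fun status c =>
      if PySem.Int.mod i c = 0 then
        (if PySem.Int.mod m c = 0 then 1 else status)
      else status) 0

-- remove_repetidos helper
def remove_repetidos (lista : List Int) : List Int :=
  PySem.List.sorted (lista.foldl (fun l i => if i ∈ l then l else l ++ [i]) []) (fun x => x) false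

def encriptKey (num : Int) (tetaN : Int) : Option Int :=
  let lista :=
    (PySem.List.pyRange 2 num 1).foldl
      (fun l i => if pvStatusA i num = 0 then l ++ [i] else l) []
  let _lista := remove_repetidos lista   -- computed and discarded, as in A
  pvLoopA tetaN (PySem.List.pyRange 2 tetaN 1)
where
  pvLoopA (tetaN : Int) : List Int → Option Int
  | [] => none
  | i :: rest => if pvStatusA i tetaN = 0 then some i else pvLoopA tetaN rest

-- ===== PORT B =====
-- Source B's hand-written Euclid loop: a, b = abs(a), abs(b); while b: a, b = b, a % b
def pvGcdNat : Nat → Nat → Nat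
  | a, 0 => a
  | a, Nat.succ b => pvGcdNat (Nat.succ b) (a % Nat.succ b)
termination_by a b => b
decreasing_by exact Nat.mod_lt _ (Nat.succ_pos b)

def pvGcd (a b : Int) : Int := (pvGcdNat a.natAbs b.natAbs : Int)

-- 'for i in range(2, tetaN)' with early return: counter recursion (range is lazy in Python)
def encriptKey_alt (num : Int) (tetaN : Int) : Option Int :=
  pvLoopB tetaN 2
where
  pvLoopB (tetaN i : Int) : Option Int :=
    if _h : i < tetaN then
      if pvGcd i tetaN = 1 then some i else pvLoopB tetaN (i + 1)
    else none
  termination_by (tetaN - i).toNat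
  decreasing_by omega

-- ===== PRECONDITION & SPEC =====
def Spec_encriptKey (num : Int) (tetaN : Int) (out : Option Int) : Prop := out = encriptKey_alt num tetaN
instance (num : Int) (tetaN : Int) (out : Option Int) : Decidable (Spec_encriptKey num tetaN out) := by unfold Spec_encriptKey; infer_instance

-- ===== CLAIM (what is proved, stated in full; the proofs are below) =====
def Claim_equal_encriptKey : Prop := ∀ (num : Int) (tetaN : Int), Dom_encriptKey num tetaN → Spec_encriptKey num tetaN (encriptKey num tetaN)

-- ===== LEMMAS AND PROOFS =====

theorem pvGcdNat_eq_gcd : ∀ (b a : Nat), pvGcdNat a b = Nat.gcd a b := by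
  intro b
  induction b using Nat.strong_induction_on with
  | _ b ih =>
    intro a
    match b with
    | 0 => simp [pvGcdNat]
    | Nat.succ b =>
      rw [pvGcdNat, ih (a % Nat.succ b) (Nat.mod_lt _ (Nat.succ_pos b))]
      rw [Nat.gcd_comm (Nat.succ b), ← Nat.gcd_rec]
      exact Nat.gcd_comm _ _

theorem pvStatusA_foldl (i m : Int) : ∀ (l : List Int) (s : Int),
    l.foldl (fun status c =>
      if PySem.Int.mod i c = 0 then
        (if PySem.Int.mod m c = 0 then 1 else status)
      else status) s
    = if ∃ c ∈ l, PySem.Int.mod i c = 0 ∧ PySem.Int.mod m c = 0 then 1 else s := by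
  intro l
  induction l with
  | nil => simp
  | cons c rest ih =>
    intro s
    rw [List.foldl_cons]
    by_cases hc : PySem.Int.mod i c = 0 ∧ PySem.Int.mod m c = 0
    · rw [if_pos hc.1, if_pos hc.2, ih]
      conv_rhs => rw [if_pos (⟨c, List.mem_cons_self .., hc⟩ :
        ∃ x ∈ c :: rest, PySem.Int.mod i x = 0 ∧ PySem.Int.mod m x = 0)]
      split_ifs <;> rfl
    · have hstep : (if PySem.Int.mod i c = 0 then
          if PySem.Int.mod m c = 0 then (1 : Int) else s else s) = s := by
        split_ifs with h1 h2
        · exact absurd ⟨h1, h2⟩ hc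
        · rfl
        · rfl
      rw [hstep, ih]
      by_cases hr : ∃ x ∈ rest, PySem.Int.mod i x = 0 ∧ PySem.Int.mod m x = 0
      · obtain ⟨x, hx, hp⟩ := hr
        rw [if_pos ⟨x, hx, hp⟩, if_pos ⟨x, List.mem_cons_of_mem _ hx, hp⟩]
      · rw [if_neg hr, if_neg (by
          rintro ⟨x, hx, hp⟩
          rcases List.mem_cons.mp hx with rfl | hx'
          · exact hc hp
          · exact hr ⟨x, hx', hp⟩)]

theorem pvStatus_zero_iff_gcd_one (i m : Int) (hi : 2 ≤ i) :
    pvStatusA i m = 0 ↔ pvGcd i m = 1 := by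
  unfold pvStatusA
  rw [pvStatusA_foldl]
  constructor
  · intro h
    by_contra hg
    -- gcd ≠ 1: the gcd itself is a common divisor in [2, i+1)
    set g : Nat := Nat.gcd i.natAbs m.natAbs with hgdef
    have hgne1 : g ≠ 1 := by
      intro h1
      apply hg
      split at h
      · exact absurd h (by norm_num)
      · simp [pvGcd, pvGcdNat_eq_gcd, ← hgdef, h1]
    have hipos : 0 < i.natAbs := by omega
    have hgpos : 0 < g := Nat.gcd_pos_of_pos_left _ hipos
    have hg2 : 2 ≤ g := by omega
    have habs_i : ((i.natAbs : Int)) ∣ i := Int.natAbs_dvd.mpr dvd_rfl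
    have habs_m : ((m.natAbs : Int)) ∣ m := Int.natAbs_dvd.mpr dvd_rfl
    have hdvd_i : (g : Int) ∣ i :=
      dvd_trans (Int.natCast_dvd_natCast.mpr (Nat.gcd_dvd_left _ _)) habs_i
    have hdvd_m : (g : Int) ∣ m :=
      dvd_trans (Int.natCast_dvd_natCast.mpr (Nat.gcd_dvd_right _ _)) habs_m
    have hle : g ≤ i.natAbs := Nat.le_of_dvd hipos (Nat.gcd_dvd_left _ _)
    have hmem : (g : Int) ∈ PySem.List.pyRange 2 (i+1) 1 := by
      rw [PySem.List.mem_pyRange_one]; omega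
    split at h
    · exact absurd h (by norm_num)
    · rename_i hnone
      exact hnone ⟨(g : Int), hmem,
        (PySem.Int.mod_eq_zero_iff_dvd i (g : Int)).mpr hdvd_i,
        (PySem.Int.mod_eq_zero_iff_dvd m (g : Int)).mpr hdvd_m⟩
  · intro hg
    split
    · rename_i hex
      obtain ⟨c, hmem, hci, hcm⟩ := hex
      rw [PySem.List.mem_pyRange_one] at hmem
      have hci' : c ∣ i := (PySem.Int.mod_eq_zero_iff_dvd i c).mp hci
      have hcm' : c ∣ m := (PySem.Int.mod_eq_zero_iff_dvd m c).mp hcm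
      have hdg : c.natAbs ∣ Nat.gcd i.natAbs m.natAbs :=
        Nat.dvd_gcd (Int.natAbs_dvd_natAbs.mpr hci') (Int.natAbs_dvd_natAbs.mpr hcm')
      have hg1 : Nat.gcd i.natAbs m.natAbs = 1 := by
        have := hg
        simp only [pvGcd, pvGcdNat_eq_gcd] at this
        exact_mod_cast this
      rw [hg1] at hdg
      have : c.natAbs = 1 := Nat.eq_one_of_dvd_one hdg
      omega
    · rfl

theorem pvLoops_eq (m : Int) : ∀ (n : Nat) (i : Int), (m - i).toNat = n → 2 ≤ i →
    encriptKey.pvLoopA m (PySem.List.pyRange i m 1) = encriptKey_alt.pvLoopB m i := by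
  intro n
  induction n using Nat.strong_induction_on with
  | _ n ih =>
    intro i hn hi
    rw [encriptKey_alt.pvLoopB]
    by_cases h : i < m
    · rw [PySem.List.pyRange_one_cons h, encriptKey.pvLoopA, dif_pos h]
      by_cases hs : pvStatusA i m = 0
      · rw [if_pos hs, if_pos ((pvStatus_zero_iff_gcd_one i m hi).mp hs)]
      · rw [if_neg hs, if_neg (fun hg => hs ((pvStatus_zero_iff_gcd_one i m hi).mpr hg))]
        exact ih (m - (i + 1)).toNat (by omega) (i + 1) rfl (by omega)
    · rw [PySem.List.pyRange_one_eq_nil (by omega), dif_neg h]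
      rfl

-- ===== VERDICT (by name: the statement is the Claim_ definition above) =====
theorem encriptKey_spec : Claim_equal_encriptKey := by
  unfold Claim_equal_encriptKey
  intro num tetaN _
  unfold Spec_encriptKey encriptKey encriptKey_alt
  exact pvLoops_eq tetaN (tetaN - 2).toNat 2 rfl (by omega)
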